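-- pv_equiv track=rewrite | github.com/GenryEden/kpolyakovName | 3747.py | f
-- ===== SOURCE A (Python) =====
-- def f(x):
-- 	if x < 5:
-- 		return 0
-- 	if x == 5:
-- 		return 1
-- 	if x == 10 or x == 15:
-- 		return 0
-- 	ans = f(x-1)
-- 	if x - 1 != 11:
-- 		ans += f(x-2)
-- 		if x - 2 != 11:
-- 			ans += f(x-3)
-- 	return ans
-- ===== SOURCE B (Python) =====
-- def f(x):
--     if x < 5:
--         return 0
--     a, b, c = 0, 0, 1  # f(n-2), f(n-1), f(n) for n = 5
--     for n in range(6, x + 1):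
--         if n == 10 or n == 15:
--             t = 0
--         else:
--             t = c
--             if n - 1 != 11:
--                 t += b
--                 if n - 2 != 11:
--                     t += a
--         a, b, c = b, c, t
--     return c
-- ===== Notes on version B (the rewrite author's own statement) =====
-- stated objective: faster
-- what changed: Replaces the exponential three-way recursion with a bottom-up linear pass keeping only the last three values in a rolling triple; Pre_ excludes x > 985, where A's depth-x recursion overflows CPython's recursion limit (RecursionError) or, just below the overflow point, diverges. Intended as faster; a timing run measured A timing out already on that run's small inputs while B returns, so no ratio could be read.
import Mathlib
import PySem

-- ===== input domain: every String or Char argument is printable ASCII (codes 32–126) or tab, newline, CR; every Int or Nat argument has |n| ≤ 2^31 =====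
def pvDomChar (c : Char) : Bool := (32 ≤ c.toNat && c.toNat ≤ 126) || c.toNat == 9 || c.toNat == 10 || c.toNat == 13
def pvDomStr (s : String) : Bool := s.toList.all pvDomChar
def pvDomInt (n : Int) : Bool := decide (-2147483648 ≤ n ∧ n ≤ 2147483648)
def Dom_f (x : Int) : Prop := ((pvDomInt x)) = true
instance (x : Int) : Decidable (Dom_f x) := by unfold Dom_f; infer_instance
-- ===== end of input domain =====

-- B replaces A's exponential three-way recursion by a bottom-up linear pass over a rolling triple (intended as faster; a timing run saw A time out on its small inputs while B returned, so no ratio was measured).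

-- ===== PORT A =====
def f (x : Int) : Int :=
  if _h1 : x < 5 then 0
  else if _h2 : x = 5 then 1
  else if _h3 : x = 10 ∨ x = 15 then 0
  else
    let ans := f (x - 1)
    if x - 1 ≠ 11 then
      let ans := ans + f (x - 2)
      if x - 2 ≠ 11 then ans + f (x - 3) else ans
    else ans
termination_by x.toNat
decreasing_by all_goals omega

-- ===== PORT B =====
-- one loop iteration of Source B's rolling triple (a, b, c) = (f(n-2), f(n-1), f(n))
def fStep (s : Int × Int × Int) (n : Int) : Int × Int × Int :=
  let t :=
    if n = 10 ∨ n = 15 then 0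
    else
      let t := s.2.2
      if n - 1 ≠ 11 then
        let t := t + s.2.1
        if n - 2 ≠ 11 then t + s.1 else t
      else t
  (s.2.1, s.2.2, t)

def f_alt (x : Int) : Int :=
  if x < 5 then 0
  else ((PySem.List.pyRange 6 (x + 1) 1).foldl fStep (0, 0, 1)).2.2

-- ===== PRECONDITION & SPEC =====
-- Pre_ excludes large x (x > 985), where Python A's depth-x recursion overflows CPython's
-- default recursion limit and raises RecursionError (a few frames' margin for the caller's
-- stack; in the gap below the exact overflow point A diverges and returns nothing); B returns normally there.
def Pre_f (x : Int) : Prop := x ≤ 985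
instance (x : Int) : Decidable (Pre_f x) := by unfold Pre_f; infer_instance
def pvWitness_f : Int := (7)

def Spec_f (x : Int) (out : Int) : Prop := out = f_alt x
instance (x : Int) (out : Int) : Decidable (Spec_f x out) := by unfold Spec_f; infer_instance

-- ===== CLAIM (what is proved, stated in full; the proofs are below) =====
def Claim_equal_f : Prop := ∀ (x : Int), Dom_f x → Pre_f x → Spec_f x (f x)

-- ===== LEMMAS AND PROOFS =====

theorem f_base_lt (x : Int) (h : x < 5) : f x = 0 := by
  rw [f]; simp [h]

theorem f_step_eq (n : Int) (h : 6 ≤ n) :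
    fStep (f (n - 3), f (n - 2), f (n - 1)) n = (f (n - 2), f (n - 1), f n) := by
  have hn : f n =
      if n = 10 ∨ n = 15 then 0
      else
        let ans := f (n - 1)
        if n - 1 ≠ 11 then
          let ans := ans + f (n - 2)
          if n - 2 ≠ 11 then ans + f (n - 3) else ans
        else ans := by
    rw [f]; simp [show ¬ n < 5 by omega, show ¬ n = 5 by omega]
  unfold fStep
  rw [hn]

theorem fold_inv (k : Nat) :
    (PySem.List.pyRange 6 (6 + (k : Int)) 1).foldl fStep (0, 0, 1)
      = (f (3 + k), f (4 + k), f (5 + k)) := by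
  induction k with
  | zero =>
    rw [PySem.List.pyRange_one_eq_nil (by omega)]
    simp [f_base_lt 3 (by norm_num), f_base_lt 4 (by norm_num)]
    rw [f]; norm_num
  | succ k ih =>
    have hcast : (6 + ((k + 1 : Nat) : Int)) = (6 + (k : Int)) + 1 := by push_cast; ring
    rw [hcast, PySem.List.pyRange_one_succ_right (by omega), List.foldl_append, ih]
    simp only [List.foldl]
    have h := f_step_eq (6 + (k : Int)) (by omega)
    have e3 : (6 + (k : Int)) - 3 = 3 + k := by ring
    have e2 : (6 + (k : Int)) - 2 = 4 + k := by ring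
    have e1 : (6 + (k : Int)) - 1 = 5 + k := by ring
    rw [e3, e2, e1] at h
    rw [h]
    push_cast
    rw [show (3 : Int) + ((k : Int) + 1) = 4 + k from by ring,
       show (4 : Int) + ((k : Int) + 1) = 5 + k from by ring,
       show (5 : Int) + ((k : Int) + 1) = 6 + k from by ring]

-- ===== VERDICT (by name: the statement is the Claim_ definition above) =====
theorem f_spec : Claim_equal_f := by
  intro x _ _
  unfold Spec_f f_alt
  by_cases hx : x < 5
  · simp [hx, f_base_lt x hx]
  · simp only [hx, if_false]
    have hk : x + 1 = 6 + (((x - 5).toNat : Nat) : Int) := by omega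
    rw [hk, fold_inv]
    have : (5 : Int) + ((x - 5).toNat : Int) = x := by omega
    rw [this]
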